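-- pv_equiv track=rewrite | github.com/jwalsh/builder-workspace | scripts/generate_specs.py | extract_conjectures
-- ===== SOURCE A (Python) =====
-- def extract_conjectures(project_name: str, description: str, tasks: list[dict]) -> list[dict]:
--     """Derive conjectures from project description and tasks."""
--     conjectures = []
--     conjecture_id = 1
--
--     # Core feasibility conjecture
--     conjectures.append({
--         "id": f"C-{conjecture_id:03d}",
--         "claim": f"{project_name} can deliver its core value proposition as described",
--         "falsification": "Integration test of end-to-end workflow fails to produce expected output"
--     })
--     conjecture_id += 1
--
--     # Check for AI/ML tasks
--     ai_tasks = [t for t in tasks if any(kw in t.get("description", "").lower()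
--                 for kw in ["ai", "ml", "machine learning", "neural", "model", "training"])]
--     if ai_tasks:
--         conjectures.append({
--             "id": f"C-{conjecture_id:03d}",
--             "claim": "AI/ML components achieve sufficient accuracy for production use",
--             "falsification": "Model accuracy on held-out test set falls below domain-specific threshold"
--         })
--         conjecture_id += 1
--
--     # Check for real-time requirements
--     rt_tasks = [t for t in tasks if any(kw in t.get("description", "").lower()
--                 for kw in ["real-time", "realtime", "real time", "streaming", "latency"])]
--     if rt_tasks:
--         conjectures.append({
--             "id": f"C-{conjecture_id:03d}",
--             "claim": "System meets real-time latency requirements under load",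
--             "falsification": "P95 latency exceeds target under simulated production load"
--         })
--         conjecture_id += 1
--
--     # Check for scalability concerns
--     scale_tasks = [t for t in tasks if any(kw in t.get("description", "").lower()
--                    for kw in ["scalab", "distributed", "concurrent", "throughput"])]
--     if scale_tasks:
--         conjectures.append({
--             "id": f"C-{conjecture_id:03d}",
--             "claim": "Architecture scales horizontally to meet projected demand",
--             "falsification": "Load test shows non-linear degradation before target throughput"
--         })
--         conjecture_id += 1
--
--     # Check for security tasks
--     sec_tasks = [t for t in tasks if any(kw in t.get("description", "").lower()
--                  for kw in ["security", "encryption", "auth", "vulnerab"])]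
--     if sec_tasks:
--         conjectures.append({
--             "id": f"C-{conjecture_id:03d}",
--             "claim": "Security implementation meets compliance requirements",
--             "falsification": "Penetration test or security audit reveals critical vulnerability"
--         })
--         conjecture_id += 1
--
--     return conjectures
-- ===== SOURCE B (Python) =====
-- _RULES = (
--     (("ai", "ml", "machine learning", "neural", "model", "training"),
--      "AI/ML components achieve sufficient accuracy for production use",
--      "Model accuracy on held-out test set falls below domain-specific threshold"),
--     (("real-time", "realtime", "real time", "streaming", "latency"),
--      "System meets real-time latency requirements under load",
--      "P95 latency exceeds target under simulated production load"),
--     (("scalab", "distributed", "concurrent", "throughput"),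
--      "Architecture scales horizontally to meet projected demand",
--      "Load test shows non-linear degradation before target throughput"),
--     (("security", "encryption", "auth", "vulnerab"),
--      "Security implementation meets compliance requirements",
--      "Penetration test or security audit reveals critical vulnerability"),
-- )
--
--
-- def extract_conjectures(project_name: str, description: str, tasks: list[dict]) -> list[dict]:
--     """Derive conjectures: a single task-major pass marks which rule categories
--     occur anywhere in the tasks, then conjectures are emitted from those marks,
--     numbering each by the length of the output built so far."""
--     hits = [False] * len(_RULES)
--     for t in tasks:
--         d = t.get("description", "").lower()
--         hits = [h or any(kw in d for kw in rule[0]) for h, rule in zip(hits, _RULES)]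
--
--     conjectures = [{
--         "id": "C-001",
--         "claim": f"{project_name} can deliver its core value proposition as described",
--         "falsification": "Integration test of end-to-end workflow fails to produce expected output"
--     }]
--     for h, (_, claim, falsification) in zip(hits, _RULES):
--         if h:
--             conjectures.append({
--                 "id": f"C-{len(conjectures) + 1:03d}",
--                 "claim": claim,
--                 "falsification": falsification
--             })
--     return conjectures
-- ===== Notes on version B (the rewrite author's own statement) =====
-- stated objective: alternative
-- what changed: Replaces four category-major filter-then-check passes over the task list (each materialising a filtered list and bumping an explicit id counter) with one task-major pass that marks all four category hits at once via a rules table, then emits conjectures from the marks, numbering each by the current output length instead of a counter.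
import Mathlib
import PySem

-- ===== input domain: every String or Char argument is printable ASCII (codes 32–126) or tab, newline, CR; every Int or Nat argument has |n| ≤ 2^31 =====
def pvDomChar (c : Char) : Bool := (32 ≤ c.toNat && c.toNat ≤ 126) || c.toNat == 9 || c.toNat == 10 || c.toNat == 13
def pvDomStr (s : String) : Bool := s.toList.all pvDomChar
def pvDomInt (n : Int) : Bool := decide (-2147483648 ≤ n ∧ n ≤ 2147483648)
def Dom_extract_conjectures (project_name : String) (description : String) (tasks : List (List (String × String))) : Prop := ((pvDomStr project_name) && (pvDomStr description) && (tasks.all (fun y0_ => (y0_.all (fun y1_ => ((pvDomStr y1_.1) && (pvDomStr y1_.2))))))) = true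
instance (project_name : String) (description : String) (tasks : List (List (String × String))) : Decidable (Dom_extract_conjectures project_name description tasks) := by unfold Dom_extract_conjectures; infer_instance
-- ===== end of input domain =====

-- B replaces A's four category-major filter passes by one task-major pass over a rules
-- table plus length-based numbering; return values proved equal (alternative decomposition).

-- f"C-{n:03d}" for nonnegative n (both Pythons format ids this way); exact for 0 ≤ n
def pvFmtId (n : Int) : String :=
  let s := PySem.Int.toStr n
  "C-" ++ String.ofList (List.replicate (3 - s.toList.length) '0') ++ s

-- ===== PORT A =====
def extract_conjectures (project_name : String) (description : String) (tasks : List (List (String × String))) : List (List (String × String)) :=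
  let conjectures : List (List (String × String)) := []
  let conjecture_id : Int := 1
  let conjectures := conjectures ++ [[("id", pvFmtId conjecture_id),
    ("claim", project_name ++ " can deliver its core value proposition as described"),
    ("falsification", "Integration test of end-to-end workflow fails to produce expected output")]]
  let conjecture_id := conjecture_id + 1
  let ai_tasks := tasks.filter (fun t => (["ai", "ml", "machine learning", "neural", "model", "training"]).any
      (fun kw => PySem.Str.isIn kw (PySem.Str.lower (PySem.Dict.getD ⟨t⟩ "description" ""))))
  let (conjectures, conjecture_id) :=
    if !ai_tasks.isEmpty then
      (conjectures ++ [[("id", pvFmtId conjecture_id),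
        ("claim", "AI/ML components achieve sufficient accuracy for production use"),
        ("falsification", "Model accuracy on held-out test set falls below domain-specific threshold")]], conjecture_id + 1)
    else (conjectures, conjecture_id)
  let rt_tasks := tasks.filter (fun t => (["real-time", "realtime", "real time", "streaming", "latency"]).any
      (fun kw => PySem.Str.isIn kw (PySem.Str.lower (PySem.Dict.getD ⟨t⟩ "description" ""))))
  let (conjectures, conjecture_id) :=
    if !rt_tasks.isEmpty then
      (conjectures ++ [[("id", pvFmtId conjecture_id),
        ("claim", "System meets real-time latency requirements under load"),
        ("falsification", "P95 latency exceeds target under simulated production load")]], conjecture_id + 1)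
    else (conjectures, conjecture_id)
  let scale_tasks := tasks.filter (fun t => (["scalab", "distributed", "concurrent", "throughput"]).any
      (fun kw => PySem.Str.isIn kw (PySem.Str.lower (PySem.Dict.getD ⟨t⟩ "description" ""))))
  let (conjectures, conjecture_id) :=
    if !scale_tasks.isEmpty then
      (conjectures ++ [[("id", pvFmtId conjecture_id),
        ("claim", "Architecture scales horizontally to meet projected demand"),
        ("falsification", "Load test shows non-linear degradation before target throughput")]], conjecture_id + 1)
    else (conjectures, conjecture_id)
  let sec_tasks := tasks.filter (fun t => (["security", "encryption", "auth", "vulnerab"]).any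
      (fun kw => PySem.Str.isIn kw (PySem.Str.lower (PySem.Dict.getD ⟨t⟩ "description" ""))))
  let (conjectures, _) :=
    if !sec_tasks.isEmpty then
      (conjectures ++ [[("id", pvFmtId conjecture_id),
        ("claim", "Security implementation meets compliance requirements"),
        ("falsification", "Penetration test or security audit reveals critical vulnerability")]], conjecture_id + 1)
    else (conjectures, conjecture_id)
  conjectures

-- ===== PORT B =====
def pvRules : List (List String × String × String) :=
  [(["ai", "ml", "machine learning", "neural", "model", "training"],
    "AI/ML components achieve sufficient accuracy for production use",
    "Model accuracy on held-out test set falls below domain-specific threshold"),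
   (["real-time", "realtime", "real time", "streaming", "latency"],
    "System meets real-time latency requirements under load",
    "P95 latency exceeds target under simulated production load"),
   (["scalab", "distributed", "concurrent", "throughput"],
    "Architecture scales horizontally to meet projected demand",
    "Load test shows non-linear degradation before target throughput"),
   (["security", "encryption", "auth", "vulnerab"],
    "Security implementation meets compliance requirements",
    "Penetration test or security audit reveals critical vulnerability")]

def extract_conjectures_alt (project_name : String) (description : String) (tasks : List (List (String × String))) : List (List (String × String)) :=
  let hits : List Bool := List.replicate pvRules.length false
  let hits := tasks.foldl (fun hits t =>
    let d := PySem.Str.lower (PySem.Dict.getD ⟨t⟩ "description" "")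
    (hits.zip pvRules).map (fun hr => hr.1 || hr.2.1.any (fun kw => PySem.Str.isIn kw d))) hits
  let conjectures : List (List (String × String)) := [[("id", "C-001"),
    ("claim", project_name ++ " can deliver its core value proposition as described"),
    ("falsification", "Integration test of end-to-end workflow fails to produce expected output")]]
  (hits.zip pvRules).foldl (fun conjectures hr =>
    if hr.1 then
      conjectures ++ [[("id", pvFmtId ((conjectures.length : Int) + 1)),
        ("claim", hr.2.2.1), ("falsification", hr.2.2.2)]]
    else conjectures) conjectures

-- ===== PRECONDITION & SPEC =====
def Spec_extract_conjectures (project_name : String) (description : String) (tasks : List (List (String × String))) (out : List (List (String × String))) : Prop := out = extract_conjectures_alt project_name description tasks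
instance (project_name : String) (description : String) (tasks : List (List (String × String))) (out : List (List (String × String))) : Decidable (Spec_extract_conjectures project_name description tasks out) := by unfold Spec_extract_conjectures; infer_instance

-- ===== CLAIM (what is proved, stated in full; the proofs are below) =====
def Claim_equal_extract_conjectures : Prop := ∀ (project_name : String) (description : String) (tasks : List (List (String × String))), Dom_extract_conjectures project_name description tasks → Spec_extract_conjectures project_name description tasks (extract_conjectures project_name description tasks)

-- ===== LEMMAS AND PROOFS =====

-- B's per-task match of rule i equals A's per-task filter predicate for category i
def pvMatch (kws : List String) (t : List (String × String)) : Bool :=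
  kws.any (fun kw => PySem.Str.isIn kw (PySem.Str.lower (PySem.Dict.getD ⟨t⟩ "description" "")))

-- A's truthiness test on the filtered list is `tasks.any` of the predicate
theorem pv_filter_isEmpty {α : Type} (p : α → Bool) (xs : List α) :
    (!(xs.filter p).isEmpty) = xs.any p := by
  induction xs with
  | nil => rfl
  | cons x xs ih =>
    by_cases h : p x <;> simp [List.filter_cons, List.any_cons, h, ih]

-- B's task-major fold computes, componentwise, `start_i || tasks.any (pvMatch kws_i)`
theorem pv_hits_fold (tasks : List (List (String × String))) (a b c d : Bool) :
    tasks.foldl (fun hits t =>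
      (hits.zip pvRules).map (fun hr => hr.1 || hr.2.1.any (fun kw =>
        PySem.Str.isIn kw (PySem.Str.lower (PySem.Dict.getD ⟨t⟩ "description" ""))))) [a, b, c, d]
    = [a || tasks.any (pvMatch (pvRules[0]!.1)),
       b || tasks.any (pvMatch (pvRules[1]!.1)),
       c || tasks.any (pvMatch (pvRules[2]!.1)),
       d || tasks.any (pvMatch (pvRules[3]!.1))] := by
  induction tasks generalizing a b c d with
  | nil => simp
  | cons t ts ih =>
    rw [List.foldl_cons]
    show List.foldl _
      [a || pvMatch (pvRules[0]!.1) t, b || pvMatch (pvRules[1]!.1) t,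
       c || pvMatch (pvRules[2]!.1) t, d || pvMatch (pvRules[3]!.1) t] ts = _
    rw [ih]
    simp [List.any_cons, Bool.or_assoc]

-- assembling from the four booleans: A's counter form equals B's length form
theorem pv_emit (pn : String) (h1 h2 h3 h4 : Bool) :
    (let conjectures : List (List (String × String)) := []
     let conjecture_id : Int := 1
     let conjectures := conjectures ++ [[("id", pvFmtId conjecture_id),
       ("claim", pn ++ " can deliver its core value proposition as described"),
       ("falsification", "Integration test of end-to-end workflow fails to produce expected output")]]
     let conjecture_id := conjecture_id + 1
     let (conjectures, conjecture_id) :=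
       if h1 then
         (conjectures ++ [[("id", pvFmtId conjecture_id),
           ("claim", "AI/ML components achieve sufficient accuracy for production use"),
           ("falsification", "Model accuracy on held-out test set falls below domain-specific threshold")]], conjecture_id + 1)
       else (conjectures, conjecture_id)
     let (conjectures, conjecture_id) :=
       if h2 then
         (conjectures ++ [[("id", pvFmtId conjecture_id),
           ("claim", "System meets real-time latency requirements under load"),
           ("falsification", "P95 latency exceeds target under simulated production load")]], conjecture_id + 1)
       else (conjectures, conjecture_id)
     let (conjectures, conjecture_id) :=
       if h3 then
         (conjectures ++ [[("id", pvFmtId conjecture_id),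
           ("claim", "Architecture scales horizontally to meet projected demand"),
           ("falsification", "Load test shows non-linear degradation before target throughput")]], conjecture_id + 1)
       else (conjectures, conjecture_id)
     let (conjectures, _) :=
       if h4 then
         (conjectures ++ [[("id", pvFmtId conjecture_id),
           ("claim", "Security implementation meets compliance requirements"),
           ("falsification", "Penetration test or security audit reveals critical vulnerability")]], conjecture_id + 1)
       else (conjectures, conjecture_id)
     conjectures)
    = (([h1, h2, h3, h4].zip pvRules).foldl (fun conjectures hr =>
        if hr.1 then
          conjectures ++ [[("id", pvFmtId ((conjectures.length : Int) + 1)),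
            ("claim", hr.2.2.1), ("falsification", hr.2.2.2)]]
        else conjectures)
       [[("id", "C-001"),
         ("claim", pn ++ " can deliver its core value proposition as described"),
         ("falsification", "Integration test of end-to-end workflow fails to produce expected output")]]) := by
  cases h1 <;> cases h2 <;> cases h3 <;> cases h4 <;> rfl

-- ===== VERDICT (by name: the statement is the Claim_ definition above) =====
theorem extract_conjectures_spec : Claim_equal_extract_conjectures := by
  intro pn desc tasks _
  show extract_conjectures pn desc tasks = extract_conjectures_alt pn desc tasks
  simp only [extract_conjectures, extract_conjectures_alt]
  rw [show List.replicate pvRules.length false = [false, false, false, false] from rfl,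
      pv_hits_fold]
  simp only [Bool.false_or]
  rw [← pv_filter_isEmpty (pvMatch (pvRules[0]!.1)) tasks,
      ← pv_filter_isEmpty (pvMatch (pvRules[1]!.1)) tasks,
      ← pv_filter_isEmpty (pvMatch (pvRules[2]!.1)) tasks,
      ← pv_filter_isEmpty (pvMatch (pvRules[3]!.1)) tasks]
  exact pv_emit pn _ _ _ _
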